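-- pv_equiv track=rewrite | github.com/an-nix/PickupWinder | fix_diag.py | ensure_include
-- ===== SOURCE A (Python) =====
-- def ensure_include(text: str, header: str) -> str:
--     """Add #include "header" after the first #include block if not present."""
--     inc = f'#include "{header}"'
--     if inc in text:
--         return text
--     # Insert after the last existing #include line
--     lines = text.splitlines(keepends=True)
--     last_inc = -1
--     for idx, line in enumerate(lines):
--         if line.strip().startswith('#include'):
--             last_inc = idx
--     if last_inc >= 0:
--         lines.insert(last_inc + 1, inc + '\n')
--     else:
--         lines.insert(0, inc + '\n')
--     return ''.join(lines)
-- ===== SOURCE B (Python) =====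
-- def ensure_include(text: str, header: str) -> str:
--     """Add #include "header" after the first #include block if not present."""
--     inc = f'#include "{header}"'
--     if inc in text:
--         return text
--     add = inc + '\n'
--     # Single character-level pass: incrementally match '#include' at the start of
--     # each line (after leading blanks) and remember the offset just past the last
--     # matching line; no line list is ever built.
--     NEEDLE = '#include'
--     cut = None   # offset just past the last include line seen so far
--     m = 0        # match progress on the current line; -1 = line disqualified
--     for i, ch in enumerate(text):
--         if ch == '\n' or ch == '\r':
--             if m == 8:
--                 if ch == '\r' and i + 1 < len(text) and text[i + 1] == '\n':
--                     cut = i + 2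
--                 else:
--                     cut = i + 1
--             m = 0
--         elif m == -1:
--             pass
--         elif m < 8:
--             if ch == NEEDLE[m]:
--                 m += 1
--             elif (ch == ' ' or ch == '\t') and m == 0:
--                 pass
--             else:
--                 m = -1
--     if m == 8:
--         cut = len(text)
--     if cut is None:
--         return add + text
--     return text[:cut] + add + text[cut:]
-- ===== Notes on version B (the rewrite author's own statement) =====
-- stated objective: alternative
-- what changed: B replaces A's splitlines/last-index/list-insert pipeline by a single character-level state machine over the raw string that incrementally matches '#include' at each line start and records a cut offset, then splices with two slices; no line list is built.
import Mathlib
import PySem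

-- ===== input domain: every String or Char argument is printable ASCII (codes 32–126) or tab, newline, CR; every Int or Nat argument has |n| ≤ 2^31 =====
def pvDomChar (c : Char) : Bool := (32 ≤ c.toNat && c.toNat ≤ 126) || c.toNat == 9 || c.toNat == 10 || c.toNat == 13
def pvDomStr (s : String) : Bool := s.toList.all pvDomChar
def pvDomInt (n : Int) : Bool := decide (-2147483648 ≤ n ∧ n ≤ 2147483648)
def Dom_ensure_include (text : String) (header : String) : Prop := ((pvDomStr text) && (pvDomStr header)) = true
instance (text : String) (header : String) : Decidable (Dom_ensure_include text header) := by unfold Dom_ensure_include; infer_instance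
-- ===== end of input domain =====

-- B replaces A's splitlines / last-index fold / list-insert pipeline by a single
-- character-level state machine over the raw string that incrementally matches
-- '#include' at each line start and records a cut offset, then splices with two
-- slices; no line list is built. Same return value; neither mutates its arguments.

-- the literal '#include'
def pvNeedle : List Char := ['#', 'i', 'n', 'c', 'l', 'u', 'd', 'e']

-- ===== PORT A =====
-- text.splitlines(keepends=True) — hand port, exact for the domain's line breaks
-- '\n', '\r', '\r\n' (the only splitlines breaks among chars 9/10/13/32–126).
-- takeLine cs = (first line including its terminator, rest)
def takeLine : List Char → List Char × List Char
  | [] => ([], [])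
  | c :: rest =>
    if c = '\n' then (['\n'], rest)
    else if c = '\r' then
      if rest.head? = some '\n' then (['\r', '\n'], rest.tail) else (['\r'], rest)
    else (c :: (takeLine rest).1, (takeLine rest).2)

theorem takeLine_rest_le (cs : List Char) : (takeLine cs).2.length ≤ cs.length := by
  fun_induction takeLine cs <;> simp_all [takeLine] <;> omega

theorem takeLine_rest_lt (cs : List Char) (h : cs ≠ []) :
    (takeLine cs).2.length < cs.length := by
  cases cs with
  | nil => simp at h
  | cons c rest =>
      have hle := takeLine_rest_le rest
      simp only [takeLine]
      split_ifs <;> simp [List.length_tail] <;> omega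

def splitlinesKeep (cs : List Char) : List (List Char) :=
  match cs with
  | [] => []
  | c :: rest => (takeLine (c :: rest)).1 :: splitlinesKeep (takeLine (c :: rest)).2
  termination_by cs.length
  decreasing_by exact takeLine_rest_lt (c :: rest) (by simp)

-- line.strip().startswith('#include')
def pvIncPred (line : List Char) : Bool :=
  PySem.Chars.startswith (PySem.Chars.strip line) pvNeedle

def ensure_include (text : String) (header : String) : String :=
  let inc := "#include \"".toList ++ header.toList ++ ['"']
  if PySem.Chars.isIn inc text.toList then text
  else
    let lines := splitlinesKeep text.toList
    let last_inc : Int :=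
      (PySem.List.enumerate lines).foldl
        (fun acc p => if pvIncPred p.2 then p.1 else acc) (-1)
    let lines' :=
      if last_inc ≥ 0 then PySem.List.insert lines (last_inc + 1) (inc ++ ['\n'])
      else PySem.List.insert lines 0 (inc ++ ['\n'])
    String.ofList lines'.flatten  -- ''.join

-- ===== PORT B =====
-- the for-loop of Source B: state machine over the characters; state (i, m, cut);
-- m = match progress of '#include' on the current line (-1 = disqualified);
-- returns (cut, final m)
def bScan : List Char → Nat → Int → Option Nat → Option Nat × Int
  | [], _, m, cut => (cut, m)
  | ch :: rest, i, m, cut =>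
    if ch = '\n' ∨ ch = '\r' then
      bScan rest (i + 1) 0
        (if m = 8 then
           some (if ch = '\r' ∧ rest.head? = some '\n' then i + 2 else i + 1)
         else cut)
    else if m = -1 then bScan rest (i + 1) m cut
    else if m < 8 then
      if ch = pvNeedle.getD m.toNat ' ' then bScan rest (i + 1) (m + 1) cut
      else if (ch = ' ' ∨ ch = '\t') ∧ m = 0 then bScan rest (i + 1) m cut
      else bScan rest (i + 1) (-1) cut
    else bScan rest (i + 1) m cut

def ensure_include_alt (text : String) (header : String) : String :=
  let inc := "#include \"".toList ++ header.toList ++ ['"']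
  if PySem.Chars.isIn inc text.toList then text
  else
    let add := inc ++ ['\n']
    let cs := text.toList
    let r := bScan cs 0 0 none
    match (if r.2 = 8 then some cs.length else r.1) with
    | none => String.ofList (add ++ cs)
    | some k => String.ofList (cs.take k ++ add ++ cs.drop k)  -- text[:cut] + add + text[cut:]

-- ===== PRECONDITION & SPEC =====
def Spec_ensure_include (text : String) (header : String) (out : String) : Prop := out = ensure_include_alt text header
instance (text : String) (header : String) (out : String) : Decidable (Spec_ensure_include text header out) := by unfold Spec_ensure_include; infer_instance

-- ===== CLAIM (what is proved, stated in full; the proofs are below) =====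
def Claim_equal_ensure_include : Prop := ∀ (text : String) (header : String), Dom_ensure_include text header → Spec_ensure_include text header (ensure_include text header)

-- ===== LEMMAS AND PROOFS =====

theorem takeLine_append (cs : List Char) : (takeLine cs).1 ++ (takeLine cs).2 = cs := by
  fun_induction takeLine cs <;> simp_all
  cases ‹List Char› <;> simp_all

theorem flatten_splitlinesKeep (cs : List Char) : (splitlinesKeep cs).flatten = cs := by
  fun_induction splitlinesKeep cs with
  | case1 => simp
  | case2 c rest ih => simp [ih, takeLine_append]

-- decomposition of a keepends line into terminator-free content plus its terminator
theorem takeLine_cases (cs : List Char) :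
    ∃ c t, (takeLine cs).1 = c ++ t ∧ (∀ ch ∈ c, ch ≠ '\n' ∧ ch ≠ '\r') ∧
      ((t = [] ∧ (takeLine cs).2 = []) ∨ t = ['\n'] ∨
       (t = ['\r'] ∧ (takeLine cs).2.head? ≠ some '\n') ∨ t = ['\r', '\n']) := by
  fun_induction takeLine cs with
  | case1 => exact ⟨[], [], by simp⟩
  | case2 _ => exact ⟨[], ['\n'], by simp_all⟩
  | case3 _ _ _ => exact ⟨[], ['\r', '\n'], by simp_all⟩
  | case4 _ _ _ => exact ⟨[], ['\r'], by simp_all⟩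
  | case5 c rest h1 h2 ih =>
      obtain ⟨c', t, he, hc, ht⟩ := ih
      exact ⟨c :: c', t, by simp [he], by simp_all, ht⟩

-- A's forward fold computing the last matching index
def aLast (lines : List (List Char)) : Int :=
  (PySem.List.enumerate lines).foldl
    (fun acc p => if pvIncPred p.2 then p.1 else acc) (-1)

theorem aLast_append (ys : List (List Char)) (y : List Char) :
    aLast (ys ++ [y]) = if pvIncPred y then (ys.length : Int) else aLast ys := by
  simp [aLast, PySem.List.enumerate_append, PySem.List.enumerate]

-- the shared specification: offset just past the last include line
def lastCut : List (List Char) → Nat → Option Nat → Option Nat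
  | [], _, cut => cut
  | l :: ls, off, cut =>
      lastCut ls (off + l.length) (if pvIncPred l then some (off + l.length) else cut)

theorem lastCut_append (ys : List (List Char)) (y : List Char) (off : Nat) (cut : Option Nat) :
    lastCut (ys ++ [y]) off cut =
      if pvIncPred y then some (off + ys.flatten.length + y.length) else lastCut ys off cut := by
  induction ys generalizing off cut with
  | nil => simp [lastCut]
  | cons l ls ih =>
      simp only [List.cons_append, lastCut, ih]
      split
      · simp only [Option.some.injEq, List.flatten_cons, List.length_append]
        omega
      · rfl

theorem aLast_lastCut (lines : List (List Char)) :
    (aLast lines = -1 ∧ lastCut lines 0 none = none) ∨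
    ∃ i : Nat, i < lines.length ∧ aLast lines = (i : Int) ∧
      lastCut lines 0 none = some ((lines.take (i + 1)).flatten.length) := by
  induction lines using List.reverseRecOn with
  | nil => left; exact ⟨rfl, rfl⟩
  | append_singleton ys y ih =>
      rw [aLast_append, lastCut_append]
      by_cases hy : pvIncPred y
      · right
        refine ⟨ys.length, by simp, by simp [hy], ?_⟩
        rw [if_pos hy, List.take_of_length_le (by simp)]
        simp
      · rcases ih with ⟨h1, h2⟩ | ⟨i, hi, h1, h2⟩
        · left; simp [hy, h1, h2]
        · right
          refine ⟨i, by simp; omega, by simp [hy, h1], ?_⟩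
          simp [hy, h2, List.take_append_of_le_length (by omega : i + 1 ≤ ys.length)]

-- ---- B side: the state machine against lastCut ----

-- per-character transition of bScan on a non-newline character
def mStep (m : Int) (ch : Char) : Int :=
  if m = -1 then m
  else if m < 8 then
    if ch = pvNeedle.getD m.toNat ' ' then m + 1
    else if (ch = ' ' ∨ ch = '\t') ∧ m = 0 then m
    else -1
  else m

def mRun (m : Int) (c : List Char) : Int := c.foldl mStep m

theorem bScan_nonnl (ch : Char) (h1 : ch ≠ '\n') (h2 : ch ≠ '\r')
    (rest : List Char) (i : Nat) (m : Int) (cut : Option Nat) :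
    bScan (ch :: rest) i m cut = bScan rest (i + 1) (mStep m ch) cut := by
  rw [bScan, if_neg (by simp [h1, h2])]
  unfold mStep
  split_ifs <;> rfl

theorem bScan_content (c : List Char) (hc : ∀ ch ∈ c, ch ≠ '\n' ∧ ch ≠ '\r')
    (rest : List Char) (i : Nat) (m : Int) (cut : Option Nat) :
    bScan (c ++ rest) i m cut = bScan rest (i + c.length) (mRun m c) cut := by
  induction c generalizing i m with
  | nil => simp [mRun]
  | cons ch c' ih =>
      rw [List.cons_append,
        bScan_nonnl ch (hc ch (by simp)).1 (hc ch (by simp)).2,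
        ih (fun x hx => hc x (by simp [hx])),
        show i + 1 + c'.length = i + (ch :: c').length from by
          simp only [List.length_cons]; omega]
      rfl

theorem mStep_neg_one (ch : Char) : mStep (-1) ch = -1 := by simp [mStep]

theorem mStep_eight (ch : Char) : mStep 8 ch = 8 := by simp [mStep]

theorem mRun_neg_one (c : List Char) : mRun (-1) c = -1 := by
  induction c with
  | nil => rfl
  | cons ch c' ih => simp [mRun, mStep_neg_one] at ih ⊢; exact ih

theorem mRun_eight (c : List Char) : mRun 8 c = 8 := by
  induction c with
  | nil => rfl
  | cons ch c' ih => simp [mRun, mStep_eight] at ih ⊢; exact ih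

theorem needle_drop : ∀ k < 8,
    pvNeedle.drop k = pvNeedle.getD k ' ' :: pvNeedle.drop (k + 1) := by decide

theorem mRun_pos (c : List Char) (k : Nat) (h1 : 1 ≤ k) (h8 : k ≤ 8) :
    (mRun (k : Int) c = 8 ↔ pvNeedle.drop k <+: c) := by
  induction c generalizing k with
  | nil =>
      simp only [mRun, List.foldl_nil, List.prefix_nil]
      constructor
      · intro h
        have hk : k = 8 := by exact_mod_cast h
        subst hk; decide
      · intro h
        have hl := congrArg List.length h
        simp only [pvNeedle, List.length_drop, List.length_nil, List.length_cons] at hl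
        have hk : k = 8 := by omega
        subst hk; rfl
  | cons ch c' ih =>
      by_cases hk8 : k = 8
      · subst hk8
        rw [show ((8 : Nat) : Int) = 8 by norm_num, mRun_eight,
          show pvNeedle.drop 8 = [] from by decide]
        simp [List.nil_prefix]
      · have hklt : k < 8 := by omega
        rw [needle_drop k hklt]
        have hstep : mRun (k : Int) (ch :: c') = mRun (mStep (k : Int) ch) c' := by
          simp [mRun]
        rw [hstep]
        have hm1 : (k : Int) ≠ -1 := by omega
        have hm8 : (k : Int) < 8 := by exact_mod_cast hklt
        by_cases hch : ch = pvNeedle.getD k ' '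
        · have : mStep (k : Int) ch = (k : Int) + 1 := by
            unfold mStep
            rw [Int.toNat_natCast, if_neg hm1, if_pos hm8, if_pos hch]
          rw [this, show ((k : Int) + 1) = ((k + 1 : Nat) : Int) by push_cast; ring]
          rw [ih (k + 1) (by omega) (by omega)]
          simp [List.cons_prefix_cons, hch]
        · have hms : mStep (k : Int) ch = -1 := by
            unfold mStep
            rw [Int.toNat_natCast, if_neg hm1, if_pos hm8, if_neg (by simpa using hch),
              if_neg (by rintro ⟨-, h0⟩; omega)]
          rw [hms, mRun_neg_one]
          rw [List.cons_prefix_cons]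
          simp
          intro h
          exact absurd h.symm (by simpa using hch)
  
theorem mRun_zero (c : List Char) :
    (mRun 0 c = 8 ↔ pvNeedle <+: c.dropWhile (fun ch => decide (ch = ' ' ∨ ch = '\t'))) := by
  induction c with
  | nil =>
      simp [mRun]
      decide
  | cons ch c' ih =>
      have hstep : mRun 0 (ch :: c') = mRun (mStep 0 ch) c' := by simp [mRun]
      by_cases hch : ch = '#'
      · subst hch
        have hms : mStep 0 '#' = 1 := by decide
        rw [hstep, hms]
        rw [show (1 : Int) = ((1 : Nat) : Int) by rfl, mRun_pos c' 1 (by omega) (by omega)]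
        rw [List.dropWhile_cons, if_neg (by decide)]
        rw [show pvNeedle = '#' :: pvNeedle.drop 1 from by decide, List.cons_prefix_cons]
        simp
      · by_cases hbl : ch = ' ' ∨ ch = '\t'
        · have hms : mStep 0 ch = 0 := by
            unfold mStep
            rw [if_neg (by norm_num), if_pos (by norm_num),
              if_neg (by simpa [show pvNeedle.getD 0 ' ' = '#' from rfl] using hch),
              if_pos ⟨hbl, rfl⟩]
          rw [hstep, hms, ih, List.dropWhile_cons, if_pos (by simpa using hbl)]
        · have hms : mStep 0 ch = -1 := by
            unfold mStep
            rw [if_neg (by norm_num), if_pos (by norm_num),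
              if_neg (by simpa [show pvNeedle.getD 0 ' ' = '#' from rfl] using hch),
              if_neg (by rintro ⟨h, -⟩; exact hbl h)]
          rw [hstep, hms, mRun_neg_one, List.dropWhile_cons, if_neg (by simpa using hbl)]
          rw [show pvNeedle = '#' :: pvNeedle.drop 1 from by decide, List.cons_prefix_cons]
          simp
          intro h
          exact absurd h.symm hch

-- ---- relating A's strip/startswith predicate to the state machine ----

theorem char_eq_iff_toNat (ch c : Char) : ch = c ↔ ch.toNat = c.toNat := by
  constructor
  · intro h; rw [h]
  · intro h
    exact Char.ext (UInt32.toNat_inj.mp (by simpa using h))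

theorem isspace_eq_blank (ch : Char) (hdom : pvDomChar ch = true)
    (h1 : ch ≠ '\n') (h2 : ch ≠ '\r') :
    PySem.Chars.isspace ch = decide (ch = ' ' ∨ ch = '\t') := by
  have hn : ch.toNat ≠ 10 := fun h => h1 ((char_eq_iff_toNat ch '\n').mpr h)
  have hr : ch.toNat ≠ 13 := fun h => h2 ((char_eq_iff_toNat ch '\r').mpr h)
  simp only [pvDomChar, Bool.or_eq_true, Bool.and_eq_true, decide_eq_true_eq, beq_iff_eq] at hdom
  have hd : ch.toNat = 9 ∨ (32 ≤ ch.toNat ∧ ch.toNat ≤ 126) := by tauto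
  rw [Bool.eq_iff_iff]
  unfold PySem.Chars.isspace
  simp only [Bool.or_eq_true, Bool.and_eq_true, decide_eq_true_eq,
    char_eq_iff_toNat ch ' ', char_eq_iff_toNat ch '\t',
    show (' ').toNat = 32 from rfl, show ('\t').toNat = 9 from rfl]
  omega

theorem dropWhile_isspace_blank (c : List Char) (hdom : ∀ ch ∈ c, pvDomChar ch = true)
    (hc : ∀ ch ∈ c, ch ≠ '\n' ∧ ch ≠ '\r') :
    c.dropWhile PySem.Chars.isspace = c.dropWhile (fun ch => decide (ch = ' ' ∨ ch = '\t')) := by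
  induction c with
  | nil => rfl
  | cons ch c' ih =>
      have he := isspace_eq_blank ch (hdom ch (by simp)) (hc ch (by simp)).1 (hc ch (by simp)).2
      simp only [List.dropWhile_cons, he]
      split
      · exact ih (fun x hx => hdom x (by simp [hx])) (fun x hx => hc x (by simp [hx]))
      · rfl

theorem needle_prefix_rstrip (d : List Char) :
    pvNeedle <+: (d.reverse.dropWhile PySem.Chars.isspace).reverse ↔ pvNeedle <+: d := by
  have hne : pvNeedle.reverse.dropWhile PySem.Chars.isspace = pvNeedle.reverse := by decide
  constructor
  · intro h
    refine h.trans ?_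
    have h2 : (List.dropWhile PySem.Chars.isspace d.reverse).reverse <+: d.reverse.reverse :=
      List.reverse_prefix.mpr (List.dropWhile_suffix _)
    rwa [List.reverse_reverse] at h2
  · rintro ⟨u, rfl⟩
    rw [List.reverse_append, List.dropWhile_append]
    split
    · rw [hne, List.reverse_reverse]
    · rw [List.reverse_append, List.reverse_reverse]
      exact List.prefix_append _ _

theorem pred_iff_mRun (c t : List Char)
    (hdom : ∀ ch ∈ c, pvDomChar ch = true)
    (hc : ∀ ch ∈ c, ch ≠ '\n' ∧ ch ≠ '\r')
    (ht : t = [] ∨ t = ['\n'] ∨ t = ['\r'] ∨ t = ['\r', '\n']) :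
    (pvIncPred (c ++ t) = true ↔ mRun 0 c = 8) := by
  rw [mRun_zero]
  unfold pvIncPred
  rw [PySem.Chars.startswith_iff]
  unfold PySem.Chars.strip PySem.Chars.lstrip PySem.Chars.rstrip
  have htsp : t.dropWhile PySem.Chars.isspace = [] := by
    rcases ht with h | h | h | h <;> subst h <;> decide
  rw [List.dropWhile_append, dropWhile_isspace_blank c hdom hc]
  set d := c.dropWhile (fun ch => decide (ch = ' ' ∨ ch = '\t')) with hd
  split
  · rw [htsp]
    simp only [List.reverse_nil, List.dropWhile_nil]
    constructor
    · intro h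
      exact absurd (List.prefix_nil.mp h) (by decide)
    · intro h
      rename_i hemp
      rw [List.isEmpty_iff] at hemp
      rw [hemp] at h
      exact absurd (List.prefix_nil.mp h) (by decide)
  · rw [List.reverse_append]
    have htr : t.reverse.dropWhile PySem.Chars.isspace = [] := by
      rcases ht with h | h | h | h <;> subst h <;> decide
    rw [List.dropWhile_append, htr]
    simp only [List.isEmpty_nil, if_pos]
    exact needle_prefix_rstrip d

-- ---- the state machine computes lastCut over the split lines ----

theorem bScan_lastCut (n : Nat) : ∀ (cs : List Char), cs.length ≤ n →
    (∀ ch ∈ cs, pvDomChar ch = true) → ∀ (i : Nat) (cut : Option Nat),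
    (if (bScan cs i 0 cut).2 = 8 then some (i + cs.length) else (bScan cs i 0 cut).1)
      = lastCut (splitlinesKeep cs) i cut := by
  induction n with
  | zero =>
      intro cs hlen _ i cut
      have : cs = [] := List.eq_nil_of_length_eq_zero (by omega)
      subst this
      simp [bScan, splitlinesKeep, lastCut]
  | succ n ih =>
      intro cs hlen hdom i cut
      cases hcs : cs with
      | nil => simp [bScan, splitlinesKeep, lastCut]
      | cons c0 rest0 =>
        subst hcs
        obtain ⟨c, t, he, hc, ht⟩ := takeLine_cases (c0 :: rest0)
        have hsplit : splitlinesKeep (c0 :: rest0)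
            = (takeLine (c0 :: rest0)).1 :: splitlinesKeep (takeLine (c0 :: rest0)).2 := by
          rw [splitlinesKeep]
        have hrlt : (takeLine (c0 :: rest0)).2.length < (c0 :: rest0).length :=
          takeLine_rest_lt _ (by simp)
        set r := (takeLine (c0 :: rest0)).2 with hr
        clear_value r
        have happ : (c ++ t) ++ r = c0 :: rest0 := by
          rw [← he, hr]; exact takeLine_append _
        have hdomc : ∀ ch ∈ c, pvDomChar ch = true := by
          intro ch hch; exact hdom ch (by rw [← happ]; simp [hch])
        have hdomr : ∀ ch ∈ r, pvDomChar ch = true := by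
          intro ch hch; exact hdom ch (by rw [← happ]; simp [hch])
        have hrn : r.length ≤ n := by
          simp only [List.length_cons] at hrlt hlen; omega
        have ht' : t = [] ∨ t = ['\n'] ∨ t = ['\r'] ∨ t = ['\r', '\n'] := by tauto
        have hpred := pred_iff_mRun c t hdomc hc ht'
        rw [hsplit, he, ← happ]
        rw [List.append_assoc, bScan_content c hc]
        rw [lastCut]
        rcases ht with ⟨ht, hrnil⟩ | ht | ⟨ht, hhd⟩ | ht
        · -- last line, no terminator
          subst ht; subst hrnil
          simp only [List.append_nil] at hpred ⊢
          rw [show bScan [] (i + c.length) (mRun 0 c) cut = (cut, mRun 0 c) from rfl]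
          rw [show splitlinesKeep [] = [] from by simp [splitlinesKeep]]
          by_cases hm : mRun 0 c = 8
          · rw [if_pos hm, if_pos (hpred.mpr hm)]
            rfl
          · rw [if_neg hm, if_neg (fun h => hm (hpred.mp h))]
            rfl
        · -- '\n' terminator
          subst ht
          rw [show (['\n'] ++ r) = '\n' :: r from rfl]
          rw [bScan, if_pos (Or.inl rfl : ('\n' = '\n' ∨ '\n' = '\r'))]
          rw [if_neg (by rintro ⟨h, -⟩; exact absurd h (by decide)
            : ¬('\n' = '\r' ∧ r.head? = some '\n'))]
          rw [show i + (c ++ '\n' :: r).length = (i + c.length + 1) + r.length from by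
            simp only [List.length_append, List.length_cons]; omega]
          rw [ih r hrn hdomr]
          congr 1
          · simp only [List.length_append, List.length_cons, List.length_nil]; omega
          · by_cases hm : mRun 0 c = 8
            · rw [if_pos hm, if_pos (hpred.mpr hm)]
              congr 1
              simp only [List.length_append, List.length_cons, List.length_nil]; omega
            · rw [if_neg hm, if_neg (fun h => hm (hpred.mp h))]
        · -- '\r' terminator not followed by '\n'
          subst ht
          rw [show (['\r'] ++ r) = '\r' :: r from rfl]
          rw [bScan, if_pos (Or.inr rfl : ('\r' = '\n' ∨ '\r' = '\r'))]
          rw [if_neg (by rintro ⟨-, h⟩; exact hhd h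
            : ¬('\r' = '\r' ∧ r.head? = some '\n'))]
          rw [show i + (c ++ '\r' :: r).length = (i + c.length + 1) + r.length from by
            simp only [List.length_append, List.length_cons]; omega]
          rw [ih r hrn hdomr]
          congr 1
          · simp only [List.length_append, List.length_cons, List.length_nil]; omega
          · by_cases hm : mRun 0 c = 8
            · rw [if_pos hm, if_pos (hpred.mpr hm)]
              congr 1
              simp only [List.length_append, List.length_cons, List.length_nil]; omega
            · rw [if_neg hm, if_neg (fun h => hm (hpred.mp h))]
        · -- '\r\n' terminator
          subst ht
          rw [show (['\r', '\n'] ++ r) = '\r' :: '\n' :: r from rfl]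
          rw [bScan, if_pos (Or.inr rfl : ('\r' = '\n' ∨ '\r' = '\r'))]
          rw [bScan, if_pos (Or.inl rfl : ('\n' = '\n' ∨ '\n' = '\r'))]
          rw [if_neg (by decide : ¬((0 : Int) = 8))]
          rw [if_pos (⟨rfl, rfl⟩ : ('\r' = '\r' ∧ ('\n' :: r).head? = some '\n'))]
          rw [show i + c.length + 1 + 1 = i + c.length + 2 from by omega]
          rw [show i + (c ++ '\r' :: '\n' :: r).length = (i + c.length + 2) + r.length from by
            simp only [List.length_append, List.length_cons]; omega]
          rw [ih r hrn hdomr]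
          congr 1
          · simp only [List.length_append, List.length_cons, List.length_nil]; omega
          · by_cases hm : mRun 0 c = 8
            · rw [if_pos hm, if_pos (hpred.mpr hm)]
              congr 1
              simp only [List.length_append, List.length_cons, List.length_nil]; omega
            · rw [if_neg hm, if_neg (fun h => hm (hpred.mp h))]

-- ===== VERDICT (by name: the statement is the Claim_ definition above) =====
theorem ensure_include_spec : Claim_equal_ensure_include := by
  intro text header hdom
  unfold Spec_ensure_include ensure_include ensure_include_alt
  by_cases hin : PySem.Chars.isIn ("#include \"".toList ++ header.toList ++ ['"']) text.toList = true
  · rw [if_pos hin, if_pos hin]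
  · rw [if_neg hin, if_neg hin]
    dsimp only
    have hdomcs : ∀ ch ∈ text.toList, pvDomChar ch = true := by
      unfold Dom_ensure_include pvDomStr at hdom
      simp only [Bool.and_eq_true, List.all_eq_true] at hdom
      exact fun ch hch => hdom.1 ch hch
    have hB := bScan_lastCut text.toList.length text.toList le_rfl hdomcs 0 none
    simp only [Nat.zero_add] at hB
    rw [hB]
    rw [show ((PySem.List.enumerate (splitlinesKeep text.toList)).foldl
          (fun acc p => if pvIncPred p.2 then p.1 else acc) (-1))
        = aLast (splitlinesKeep text.toList) from rfl]
    set lines := splitlinesKeep text.toList with hlines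
    have hflat : lines.flatten = text.toList := flatten_splitlinesKeep _
    rcases aLast_lastCut lines with ⟨h1, h2⟩ | ⟨idx, hi, h1, h2⟩
    · rw [h1, h2]
      rw [if_neg (by norm_num), PySem.List.insert_zero]
      simp [hflat]
    · rw [h1, h2]
      rw [if_pos (by positivity)]
      rw [show ((idx : Int) + 1) = ((idx + 1 : Nat) : Int) by push_cast; ring]
      rw [PySem.List.insert_natCast _ _ _ (by omega)]
      have hTD : (lines.take (idx + 1)).flatten ++ (lines.drop (idx + 1)).flatten
          = text.toList := by
        rw [← List.flatten_append, List.take_append_drop, hflat]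
      rw [← hTD]
      dsimp only
      rw [List.take_left, List.drop_left]
      simp
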